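-- pv_equiv track=rewrite | github.com/xovnsi/robocup_soccer | utils.py | calculate_formations
-- ===== SOURCE A (Python) =====
-- def calculate_formations(players_count):
--     """Calculate formation positions for both teams."""
--     # Field dimensions and positions
--     field_length = 105
--     field_width = 68
--     goal_x_left = -52
--     goal_x_right = 52
--
--     # For left team: defenders, midfielders, forwards
--     left_defender_x = goal_x_left + 10
--     left_midfielder_x = -15
--     left_forward_x = -5
--
--     # For right team: defenders, midfielders, forwards
--     right_defender_x = goal_x_right - 10
--     right_midfielder_x = 15
--     right_forward_x = 5
--
--     # Position players according to formation based on their index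
--     # Initial positions for the left team
--     left_positions = []
--     field_y_values = [-15, 0, 15]  # Left, center, right positions
--
--     # Simple formation: defenders, midfielders, forwards
--     for i in range(players_count):
--         if i % 3 == 0:  # Defenders
--             left_positions.append((left_defender_x, field_y_values[i % len(field_y_values)]))
--         elif i % 3 == 1:  # Midfielders
--             left_positions.append((left_midfielder_x, field_y_values[i % len(field_y_values)]))
--         else:  # Forwards
--             left_positions.append((left_forward_x, field_y_values[i % len(field_y_values)]))
--
--     # Initial positions for the right team
--     right_positions = []
--     for i in range(players_count):
--         if i % 3 == 0:  # Defenders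
--             right_positions.append((right_defender_x, field_y_values[i % len(field_y_values)]))
--         elif i % 3 == 1:  # Midfielders
--             right_positions.append((right_midfielder_x, field_y_values[i % len(field_y_values)]))
--         else:  # Forwards
--             right_positions.append((right_forward_x, field_y_values[i % len(field_y_values)]))
--
--     return left_positions, right_positions
-- ===== SOURCE B (Python) =====
-- def calculate_formations(players_count):
--     """Calculate formation positions for both teams."""
--     left_pattern = [(-42, -15), (-15, 0), (-5, 15)]
--     right_pattern = [(42, -15), (15, 0), (5, 15)]
--     reps = players_count // 3 + 1
--     left_positions = (left_pattern * reps)[:players_count]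
--     right_positions = (right_pattern * reps)[:players_count]
--     return left_positions, right_positions
-- ===== Notes on version B (the rewrite author's own statement) =====
-- stated objective: simpler
-- what changed: Each position depends only on i%3, so B builds two 3-element base patterns and produces each team's list by tiling (pattern * (n//3+1)) and slicing to n, replacing A's two indexed loops with a modular if/elif/else chain.
import Mathlib
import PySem

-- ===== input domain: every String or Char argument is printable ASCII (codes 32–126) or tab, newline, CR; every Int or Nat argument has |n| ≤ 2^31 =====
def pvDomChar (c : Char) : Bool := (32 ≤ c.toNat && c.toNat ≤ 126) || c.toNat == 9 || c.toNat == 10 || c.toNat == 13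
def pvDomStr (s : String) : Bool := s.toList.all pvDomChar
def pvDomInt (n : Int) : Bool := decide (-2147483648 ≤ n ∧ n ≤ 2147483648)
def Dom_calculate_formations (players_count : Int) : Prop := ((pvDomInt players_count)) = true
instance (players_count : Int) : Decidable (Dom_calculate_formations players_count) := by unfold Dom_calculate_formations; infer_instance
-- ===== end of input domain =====

-- B replaces A's two indexed loops with branch-on-i%3 by tiling a 3-element base pattern and slicing (objective: simpler).

-- ===== PORT A =====
def calculate_formations (players_count : Int) : (List (Int × Int)) × (List (Int × Int)) :=
  let goal_x_left : Int := -52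
  let goal_x_right : Int := 52
  let left_defender_x : Int := goal_x_left + 10
  let left_midfielder_x : Int := -15
  let left_forward_x : Int := -5
  let right_defender_x : Int := goal_x_right - 10
  let right_midfielder_x : Int := 15
  let right_forward_x : Int := 5
  let field_y_values : List Int := [-15, 0, 15]
  -- index i % len(field_y_values) is always in range, so pyGetD's default 0 is never used
  let left_positions :=
    (PySem.List.pyRange 0 players_count 1).foldl (fun acc i =>
      if PySem.Int.mod i 3 == 0 then
        acc ++ [(left_defender_x, PySem.List.pyGetD field_y_values (PySem.Int.mod i (field_y_values.length : Int)) 0)]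
      else if PySem.Int.mod i 3 == 1 then
        acc ++ [(left_midfielder_x, PySem.List.pyGetD field_y_values (PySem.Int.mod i (field_y_values.length : Int)) 0)]
      else
        acc ++ [(left_forward_x, PySem.List.pyGetD field_y_values (PySem.Int.mod i (field_y_values.length : Int)) 0)]) []
  let right_positions :=
    (PySem.List.pyRange 0 players_count 1).foldl (fun acc i =>
      if PySem.Int.mod i 3 == 0 then
        acc ++ [(right_defender_x, PySem.List.pyGetD field_y_values (PySem.Int.mod i (field_y_values.length : Int)) 0)]
      else if PySem.Int.mod i 3 == 1 then
        acc ++ [(right_midfielder_x, PySem.List.pyGetD field_y_values (PySem.Int.mod i (field_y_values.length : Int)) 0)]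
      else
        acc ++ [(right_forward_x, PySem.List.pyGetD field_y_values (PySem.Int.mod i (field_y_values.length : Int)) 0)]) []
  (left_positions, right_positions)

-- ===== PORT B =====
def calculate_formations_alt (players_count : Int) : (List (Int × Int)) × (List (Int × Int)) :=
  let left_pattern : List (Int × Int) := [(-42, -15), (-15, 0), (-5, 15)]
  let right_pattern : List (Int × Int) := [(42, -15), (15, 0), (5, 15)]
  let reps := PySem.Int.floordiv players_count 3 + 1
  -- Python 'list * k' has no PySem primitive; ported by hand as flatten∘replicate, exact (k ≤ 0 gives [])
  let left_positions := PySem.List.slice ((List.replicate reps.toNat left_pattern).flatten) none (some players_count)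
  let right_positions := PySem.List.slice ((List.replicate reps.toNat right_pattern).flatten) none (some players_count)
  (left_positions, right_positions)

-- ===== PRECONDITION & SPEC =====
def Spec_calculate_formations (players_count : Int) (out : (List (Int × Int)) × (List (Int × Int))) : Prop := out = calculate_formations_alt players_count
instance (players_count : Int) (out : (List (Int × Int)) × (List (Int × Int))) : Decidable (Spec_calculate_formations players_count out) := by unfold Spec_calculate_formations; infer_instance

-- ===== CLAIM (what is proved, stated in full; the proofs are below) =====
def Claim_equal_calculate_formations : Prop := ∀ (players_count : Int), Dom_calculate_formations players_count → Spec_calculate_formations players_count (calculate_formations players_count)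

-- ===== LEMMAS AND PROOFS =====

/-- period-3 pattern element -/
def pvPat (a b c : Int × Int) (i : Nat) : Int × Int :=
  if i % 3 = 0 then a else if i % 3 = 1 then b else c

theorem pvPat_add3 (a b c : Int × Int) (i : Nat) : pvPat a b c (3 + i) = pvPat a b c i := by
  simp [pvPat, Nat.add_mod_left]

/-- tiled pattern = map of pvPat over a range -/
theorem pvFlatten_replicate (a b c : Int × Int) (k : Nat) :
    (List.replicate k [a, b, c]).flatten = (List.range (3 * k)).map (pvPat a b c) := by
  induction k with
  | zero => simp
  | succ k ih =>
    have h3 : 3 * (k + 1) = 3 + 3 * k := by ring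
    rw [List.replicate_succ, List.flatten_cons, ih, h3, List.range_add, List.map_append,
      List.map_map]
    have h1 : (List.range (3 * k)).map (pvPat a b c ∘ (3 + ·)) =
        (List.range (3 * k)).map (pvPat a b c) := by
      apply List.map_congr_left; intro i _; exact pvPat_add3 a b c i
    rw [h1]
    simp [List.range_succ, pvPat]

/-- the value A appends at index (k : Int) equals pvPat k -/
theorem pvStepVal (xa xb xc : Int) (k : Nat) :
    (if PySem.Int.mod (k : Int) 3 == 0 then
        ((xa, PySem.List.pyGetD [-15, 0, 15] (PySem.Int.mod (k : Int) 3) 0) : Int × Int)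
      else if PySem.Int.mod (k : Int) 3 == 1 then
        (xb, PySem.List.pyGetD [-15, 0, 15] (PySem.Int.mod (k : Int) 3) 0)
      else
        (xc, PySem.List.pyGetD [-15, 0, 15] (PySem.Int.mod (k : Int) 3) 0))
      = pvPat (xa, -15) (xb, 0) (xc, 15) k := by
  have hm : PySem.Int.mod (k : Int) 3 = ((k % 3 : Nat) : Int) := by
    exact_mod_cast PySem.Int.mod_natCast k 3
  have h3 : k % 3 = 0 ∨ k % 3 = 1 ∨ k % 3 = 2 := by omega
  rcases h3 with h | h | h <;> rw [hm, h] <;>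
    simp [pvPat, h, PySem.List.pyGetD, PySem.List.pyGet?, PySem.List.pyIdx?]

/-- one team's A-loop, on a nonnegative count, is the mapped pattern -/
theorem pvLoopA (xa xb xc : Int) (N : Nat) :
    (PySem.List.pyRange 0 (N : Int) 1).foldl (fun acc i =>
      if PySem.Int.mod i 3 == 0 then
        acc ++ [((xa, PySem.List.pyGetD [-15, 0, 15] (PySem.Int.mod i 3) 0) : Int × Int)]
      else if PySem.Int.mod i 3 == 1 then
        acc ++ [(xb, PySem.List.pyGetD [-15, 0, 15] (PySem.Int.mod i 3) 0)]
      else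
        acc ++ [(xc, PySem.List.pyGetD [-15, 0, 15] (PySem.Int.mod i 3) 0)]) []
    = (List.range N).map (pvPat (xa, -15) (xb, 0) (xc, 15)) := by
  have hstep : (fun (acc : List (Int × Int)) (i : Int) =>
      if PySem.Int.mod i 3 == 0 then
        acc ++ [((xa, PySem.List.pyGetD [-15, 0, 15] (PySem.Int.mod i 3) 0) : Int × Int)]
      else if PySem.Int.mod i 3 == 1 then
        acc ++ [(xb, PySem.List.pyGetD [-15, 0, 15] (PySem.Int.mod i 3) 0)]
      else
        acc ++ [(xc, PySem.List.pyGetD [-15, 0, 15] (PySem.Int.mod i 3) 0)])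
      = fun acc i => acc ++
        [if PySem.Int.mod i 3 == 0 then
            ((xa, PySem.List.pyGetD [-15, 0, 15] (PySem.Int.mod i 3) 0) : Int × Int)
          else if PySem.Int.mod i 3 == 1 then
            (xb, PySem.List.pyGetD [-15, 0, 15] (PySem.Int.mod i 3) 0)
          else
            (xc, PySem.List.pyGetD [-15, 0, 15] (PySem.Int.mod i 3) 0)] := by
    funext acc i; split_ifs <;> rfl
  rw [hstep, PySem.List.foldl_append_singleton_eq_map, List.nil_append,
    PySem.List.pyRange_zero_natCast, List.map_map]
  apply List.map_congr_left
  intro k _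
  exact pvStepVal xa xb xc k

/-- one team's B-side tile-and-slice, on a nonnegative count, is the mapped pattern -/
theorem pvTileB (a b c : Int × Int) (N : Nat) :
    PySem.List.slice
      ((List.replicate (PySem.Int.floordiv (N : Int) 3 + 1).toNat [a, b, c]).flatten)
      none (some (N : Int))
    = (List.range N).map (pvPat a b c) := by
  rw [PySem.List.slice_to_natCast, pvFlatten_replicate, ← List.map_take, List.take_range]
  have hle : N ≤ 3 * (PySem.Int.floordiv (N : Int) 3 + 1).toNat := by
    have h := PySem.Int.floordiv_mul_add_mod (N : Int) 3
    have h0 := PySem.Int.mod_nonneg (N : Int) (by norm_num : (0:Int) < 3)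
    have h1 := PySem.Int.mod_lt (N : Int) (by norm_num : (0:Int) < 3)
    omega
  rw [Nat.min_eq_left hle]

/-- main equality for nonnegative counts -/
theorem pvMain (N : Nat) :
    calculate_formations (N : Int) = calculate_formations_alt (N : Int) := by
  have hlen : ((([(-15 : Int), 0, 15]).length : Nat) : Int) = 3 := by decide
  simp only [calculate_formations, calculate_formations_alt, hlen]
  rw [pvLoopA (-52 + 10) (-15) (-5) N, pvLoopA (52 - 10) 15 5 N,
    pvTileB ((-42 : Int), -15) ((-15 : Int), 0) ((-5 : Int), 15) N,
    pvTileB ((42 : Int), -15) ((15 : Int), 0) ((5 : Int), 15) N]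
  norm_num

/-- both sides are empty for negative counts -/
theorem pvNeg (n : Int) (hn : n < 0) :
    calculate_formations n = calculate_formations_alt n := by
  have hrange : PySem.List.pyRange 0 n 1 = [] :=
    PySem.List.pyRange_one_eq_nil (by omega)
  have hreps : (PySem.Int.floordiv n 3 + 1).toNat = 0 := by
    have h := PySem.Int.floordiv_mul_add_mod n 3
    have h0 := PySem.Int.mod_nonneg n (by norm_num : (0:Int) < 3)
    have h1 := PySem.Int.mod_lt n (by norm_num : (0:Int) < 3)
    omega
  simp only [calculate_formations, calculate_formations_alt]
  rw [hrange, hreps]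
  simp [PySem.List.slice]

-- ===== VERDICT (by name: the statement is the Claim_ definition above) =====
theorem calculate_formations_spec : Claim_equal_calculate_formations := by
  intro n _
  unfold Spec_calculate_formations
  rcases lt_or_ge n 0 with h | h
  · exact pvNeg n h
  · obtain ⟨N, rfl⟩ := Int.eq_ofNat_of_zero_le h
    exact pvMain N
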